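-- pv_equiv track=rewrite | github.com/MrBlacDr/Maze | src/ML/q_learning.py | connector
-- ===== SOURCE A (Python) =====
-- def connector(maze: list) -> dict:
--     """
--     Хэш-функция, соединябщая уникальные идентификаторы состояний с их координатами в матрице лабиринта.
--
--     :param maze: матрица лабиринта
--     :return: словарь-связка
--     """
--     d = {}
--     _count = 0
--     row, col = len(maze), len(maze[0])
--     for i in range(row):
--         for j in range(col):
--             d[_count] = (i, j)
--             _count += 1
--     return d
-- ===== SOURCE B (Python) =====
-- def connector(maze: list) -> dict:
--     """
--     Same mapping of state ids to coordinates, computed with a single flat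
--     loop: the id counter equals i*col + j, so divmod recovers (i, j).
--     """
--     row, col = len(maze), len(maze[0])
--     return {k: divmod(k, col) for k in range(row * col)}
-- ===== Notes on version B (the rewrite author's own statement) =====
-- stated objective: simpler
-- what changed: Replaces the nested row/column loops with the incrementing counter by a single flat loop over range(row*col) that recovers each coordinate pair in closed form via divmod(k, col).
import Mathlib
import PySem

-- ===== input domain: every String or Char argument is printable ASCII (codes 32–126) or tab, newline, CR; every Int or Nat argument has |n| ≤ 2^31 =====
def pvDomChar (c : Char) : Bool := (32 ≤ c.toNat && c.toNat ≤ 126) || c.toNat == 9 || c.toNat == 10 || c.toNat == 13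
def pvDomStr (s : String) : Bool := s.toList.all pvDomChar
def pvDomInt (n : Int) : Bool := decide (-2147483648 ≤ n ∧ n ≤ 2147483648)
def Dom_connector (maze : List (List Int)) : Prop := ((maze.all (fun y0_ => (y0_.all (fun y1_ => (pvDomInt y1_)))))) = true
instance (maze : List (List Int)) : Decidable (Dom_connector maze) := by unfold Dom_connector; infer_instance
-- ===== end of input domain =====

-- B replaces A's nested row/column loops with an incrementing counter by one flat loop over range(row*col) that recovers each coordinate pair via divmod (objective: simpler).

-- ===== PORT A =====
def connector (maze : List (List Int)) : List (Int × Int × Int) :=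
  match PySem.List.pyGet? maze 0 with
  | none => []  -- maze[0] raises IndexError: excluded by Pre_connector
  | some row0 =>
    let row : Int := maze.length
    let col : Int := row0.length
    let st := (PySem.List.pyRange 0 row 1).foldl
      (fun (st : PySem.Dict Int (Int × Int) × Int) i =>
        (PySem.List.pyRange 0 col 1).foldl
          (fun st j => (st.1.insert st.2 (i, j), st.2 + 1)) st)
      (PySem.Dict.empty, 0)
    st.1.items

-- ===== PORT B =====
def connector_alt (maze : List (List Int)) : List (Int × Int × Int) :=
  match PySem.List.pyGet? maze 0 with
  | none => []  -- maze[0] raises IndexError: excluded by Pre_connector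
  | some row0 =>
    let row : Int := maze.length
    let col : Int := row0.length
    (PySem.List.pyRange 0 (row * col) 1).map
      (fun k => (k, (PySem.Int.divmod? k col).getD (0, 0)))

-- ===== PRECONDITION & SPEC =====
-- A evaluates maze[0], which raises IndexError exactly when the maze is empty; B does the same, so only that input is excluded.
def Pre_connector (maze : List (List Int)) : Prop := maze ≠ []
instance (maze : List (List Int)) : Decidable (Pre_connector maze) := by unfold Pre_connector; infer_instance
def pvWitness_connector : List (List Int) := [[1, 2], [3, 4]]
def Spec_connector (maze : List (List Int)) (out : List (Int × Int × Int)) : Prop := out = connector_alt maze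
instance (maze : List (List Int)) (out : List (Int × Int × Int)) : Decidable (Spec_connector maze out) := by unfold Spec_connector; infer_instance

-- ===== CLAIM (what is proved, stated in full; the proofs are below) =====
def Claim_equal_connector : Prop := ∀ (maze : List (List Int)), Dom_connector maze → Pre_connector maze → Spec_connector maze (connector maze)

-- ===== LEMMAS AND PROOFS =====

-- divmod(r*col + a, col) = (r, a) for 0 ≤ a < col.
theorem divmod_closed (r a col : Int) (h0 : 0 ≤ a) (h : a < col) :
    PySem.Int.divmod? (r*col + a) col = some (r, a) := by
  have hc : col ≠ 0 := by omega
  have hcp : (0:Int) ≤ col := by omega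
  have h1 : (r*col + a).fdiv col = r := by
    rw [Int.fdiv_eq_ediv]
    simp only [hcp, true_or, if_true, sub_zero]
    rw [add_comm, Int.add_mul_ediv_right _ _ hc, Int.ediv_eq_zero_of_lt h0 h]
    ring
  have h2 : (r*col + a).fmod col = a := by
    rw [Int.fmod_eq_emod]
    simp only [hcp, true_or, if_true, add_zero]
    rw [add_comm, Int.add_mul_emod_self_right, Int.emod_eq_of_lt h0 h]
  simp [PySem.Int.divmod?, hc, h1, h2]

-- A's inner loop over range(col) starting at (d, c): each step inserts the fresh
-- key c+j (fresh because all keys of d are < c) with value (i, j) and increments the counter.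
lemma connector_inner (b : Nat) (i c : Int) (d : PySem.Dict Int (Int × Int))
    (hkeys : ∀ k ∈ d.keys, k < c) :
    ((PySem.List.pyRange 0 (b : Int) 1).foldl
      (fun (st : PySem.Dict Int (Int × Int) × Int) j => (st.1.insert st.2 (i, j), st.2 + 1)) (d, c))
    = (PySem.Dict.mk (d.items ++ (PySem.List.pyRange 0 (b : Int) 1).map (fun j => (c + j, (i, j)))), c + b) := by
  induction b with
  | zero => simp [PySem.List.pyRange_one_eq_nil]
  | succ n ih =>
    have hr : PySem.List.pyRange 0 ((n + 1 : Nat) : Int) 1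
        = PySem.List.pyRange 0 (n : Int) 1 ++ [(n : Int)] := by
      push_cast
      exact PySem.List.pyRange_one_succ_right (by positivity)
    rw [hr, List.foldl_append, ih, List.map_append]
    simp only [List.foldl_cons, List.foldl_nil, List.map_cons, List.map_nil]
    have hnc : (PySem.Dict.mk (d.items ++ (PySem.List.pyRange 0 (n:Int) 1).map (fun j => (c + j, (i, j))))).contains (c + n) = false := by
      rw [PySem.Dict.contains_eq_decide_mem_keys]
      simp only [decide_eq_false_iff_not, PySem.Dict.keys_mk, List.map_append, List.mem_append]
      rintro (hmem | hmem)
      · have := hkeys _ hmem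
        omega
      · simp only [List.map_map, List.mem_map, Function.comp] at hmem
        obtain ⟨j, hj, hje⟩ := hmem
        rw [PySem.List.mem_pyRange_one] at hj
        omega
    rw [Prod.mk.injEq]
    refine ⟨PySem.Dict.ext ?_, by push_cast; ring⟩
    rw [PySem.Dict.items_insert_of_not_contains (h := hnc)]
    simp [List.append_assoc]

-- A's outer loop after r rows (col > 0): the dict holds exactly the pairs
-- (k, divmod(k, col)) for k < r*col, and the counter is r*col — i.e. B's prefix.
lemma connector_outer (col : Int) (hcol : 0 < col) (r : Nat) :
    ((PySem.List.pyRange 0 (r : Int) 1).foldl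
      (fun (st : PySem.Dict Int (Int × Int) × Int) i =>
        (PySem.List.pyRange 0 col 1).foldl
          (fun st j => (st.1.insert st.2 (i, j), st.2 + 1)) st)
      (PySem.Dict.empty, 0))
    = (PySem.Dict.mk ((PySem.List.pyRange 0 ((r : Int) * col) 1).map
        (fun k => (k, (PySem.Int.divmod? k col).getD (0, 0)))), (r : Int) * col) := by
  induction r with
  | zero => simp [PySem.List.pyRange_one_eq_nil, PySem.Dict.empty]
  | succ n ih =>
    have hr : PySem.List.pyRange 0 ((n + 1 : Nat) : Int) 1
        = PySem.List.pyRange 0 (n : Int) 1 ++ [(n : Int)] := by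
      push_cast
      exact PySem.List.pyRange_one_succ_right (by positivity)
    rw [hr, List.foldl_append, ih]
    simp only [List.foldl_cons, List.foldl_nil]
    have hcast : ((col.toNat : Int)) = col := Int.toNat_of_nonneg (by omega)
    have hkeys : ∀ k ∈ (PySem.Dict.mk ((PySem.List.pyRange 0 ((n : Int) * col) 1).map
        (fun k => (k, (PySem.Int.divmod? k col).getD (0, 0))))).keys, k < (n : Int) * col := by
      simp only [PySem.Dict.keys_mk, List.map_map, List.mem_map, Function.comp]
      rintro k ⟨j, hj, rfl⟩
      rw [PySem.List.mem_pyRange_one] at hj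
      omega
    have := connector_inner col.toNat (n : Int) ((n : Int) * col) _ hkeys
    rw [hcast] at this
    rw [this]
    rw [Prod.mk.injEq]
    constructor
    · congr 1
      push_cast
      rw [PySem.List.pyRange_one_append 0 ((n : Int) * col) (((n : Int)+1) * col)
        (by positivity) (by nlinarith), List.map_append]
      congr 1
      rw [PySem.List.pyRange_one 0 col, PySem.List.pyRange_one ((n:Int)*col) (((n:Int)+1)*col)]
      have hlen : ((((n:Int)+1)*col - (n:Int)*col)).toNat = col.toNat := by
        congr 1; ring
      rw [hlen, sub_zero]
      simp only [List.map_map]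
      apply List.map_congr_left
      intro a ha
      rw [List.mem_range] at ha
      have ha' : (a : Int) < col := by omega
      simp only [Function.comp, zero_add]
      rw [divmod_closed (n : Int) (a : Int) col (by positivity) ha']
      simp
    · push_cast; ring

-- a fold whose step ignores the element (A's outer loop when col = 0) returns its start
lemma foldl_id {α β : Type} (l : List β) (a : α) : l.foldl (fun a _ => a) a = a := by
  induction l generalizing a with
  | nil => rfl
  | cons x xs ih => simp only [List.foldl_cons]; exact ih a

-- ===== VERDICT (by name: the statement is the Claim_ definition above) =====
theorem connector_spec : Claim_equal_connector := by
  intro maze _ hpre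
  unfold Spec_connector connector connector_alt
  match maze, hpre with
  | r0 :: rest, _ =>
    have hget : PySem.List.pyGet? (r0 :: rest) 0 = some r0 := by
      rw [show (0:Int) = ((0:Nat):Int) from rfl, PySem.List.pyGet?_natCast]
      rfl
    rw [hget]
    simp only []
    by_cases hcol0 : r0.length = 0
    · rw [hcol0]
      simp only [Nat.cast_zero, PySem.List.pyRange_one_eq_nil le_rfl, List.foldl_nil, mul_zero]
      rw [foldl_id]
      simp [PySem.Dict.empty]
    · have hcol : (0:Int) < (r0.length : Int) := by
        have : 0 < r0.length := Nat.pos_of_ne_zero hcol0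
        exact_mod_cast this
      have := connector_outer (r0.length : Int) hcol (r0 :: rest).length
      rw [this]
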